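-- pv_equiv track=rewrite | github.com/Selam25-30/Leetcode | 2532-remove-letter-to-equalize-frequency/2532-remove-letter-to-equalize-frequency.py | equalFrequency
-- ===== SOURCE A (Python) =====
-- from collections import Counter
--
-- def equalFrequency(word: str) -> bool:
--     # Get the frequency of each character in the word
--     freq = Counter(word)
--
--     # Iterate through each character in the word
--     for char in word:
--         # Decrease the frequency of the current character by 1
--         freq[char] -= 1
--
--         # If the frequency of a character drops to 0, remove it from the dictionary
--         if freq[char] == 0:
--             del freq[char]
--
--         # Get the set of frequencies left after removing the character
--         freq_set = set(freq.values())
--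
--         # If all frequencies are equal, return True
--         if len(freq_set) == 1:
--             return True
--
--         # Revert the change for the next iteration
--         freq[char] += 1
--
--     # If no valid removal was found, return False
--     return False
-- ===== SOURCE B (Python) =====
-- from collections import Counter
--
-- def equalFrequency(word: str) -> bool:
--     # Sort the counts once; the removed occurrence can only belong to a letter of
--     # minimal or maximal frequency, so only those two candidates are tested.
--     counts = sorted(Counter(word).values())
--     if not counts:
--         return False
--     return _balanced([counts[0] - 1] + counts[1:]) or _balanced(counts[:-1] + [counts[-1] - 1])
--
-- def _balanced(cs):
--     nonzero = {c for c in cs if c != 0}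
--     return len(nonzero) == 1
-- ===== Notes on version B (the rewrite author's own statement) =====
-- stated objective: faster
-- what changed: B never tries letters at all: it sorts the multiset of counts once and tests only two candidate removals (decrement the minimal count, decrement the maximal count), which is proved sufficient, instead of A's per-occurrence mutate-check-revert loop.
import Mathlib
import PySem

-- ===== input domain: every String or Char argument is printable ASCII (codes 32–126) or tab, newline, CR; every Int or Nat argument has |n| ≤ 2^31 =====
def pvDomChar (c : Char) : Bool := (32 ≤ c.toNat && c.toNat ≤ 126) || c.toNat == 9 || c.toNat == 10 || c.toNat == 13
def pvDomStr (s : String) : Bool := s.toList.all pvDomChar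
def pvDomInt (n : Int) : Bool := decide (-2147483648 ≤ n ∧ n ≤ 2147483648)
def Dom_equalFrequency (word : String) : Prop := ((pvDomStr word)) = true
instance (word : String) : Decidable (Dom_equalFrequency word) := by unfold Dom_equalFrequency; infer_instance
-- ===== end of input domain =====

-- B sorts the counts once and tests only the two candidate removals that can possibly
-- work (a letter of minimal or of maximal frequency) instead of A's per-occurrence
-- mutate-check-revert loop over the whole word.

-- ===== PORT A =====
-- the for-loop over the word's characters, carrying the mutable Counter `freq`
def eqFreqLoopA : List Char → PySem.Dict Char Int → Bool
  | [], _ => false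
  | c :: rest, freq =>
    -- freq[char] -= 1
    let d1 := freq.modify c 0 (· - 1)
    -- if freq[char] == 0: del freq[char]
    let d2 := if d1.getD c 0 == 0 then d1.erase c else d1
    -- freq_set = set(freq.values()); if len(freq_set) == 1: return True
    if PySem.Set.len (PySem.Set.ofList d2.values) == 1 then true
    else
      -- freq[char] += 1  (then continue)
      eqFreqLoopA rest (d2.modify c 0 (· + 1))

def equalFrequency (word : String) : Bool :=
  eqFreqLoopA word.toList (PySem.Dict.counter word.toList)

-- ===== PORT B =====
-- _balanced(cs): nonzero = {c for c in cs if c != 0}; len(nonzero) == 1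
def pvBalanced (cs : List Int) : Bool :=
  PySem.Set.len (PySem.Set.ofList (cs.filter (fun c => !(c == 0)))) == 1

def equalFrequency_alt (word : String) : Bool :=
  -- counts = sorted(Counter(word).values())
  match PySem.List.sorted (PySem.Dict.counter word.toList).values (fun v => v) false with
  | [] => false   -- if not counts: return False
  | c0 :: rest =>
      -- _balanced([counts[0] - 1] + counts[1:]) or _balanced(counts[:-1] + [counts[-1] - 1])
      pvBalanced ((c0 - 1) :: rest) ||
      pvBalanced ((c0 :: rest).dropLast ++ [(c0 :: rest).getLast (List.cons_ne_nil c0 rest) - 1])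

-- ===== PRECONDITION & SPEC =====
def Spec_equalFrequency (word : String) (out : Bool) : Prop := out = equalFrequency_alt word
instance (word : String) (out : Bool) : Decidable (Spec_equalFrequency word out) := by unfold Spec_equalFrequency; infer_instance

-- ===== CLAIM (what is proved, stated in full; the proofs are below) =====
def Claim_equal_equalFrequency : Prop := ∀ (word : String), Dom_equalFrequency word → Spec_equalFrequency word (equalFrequency word)

-- ===== LEMMAS AND PROOFS =====

-- the per-letter test A effectively performs, as a function of the character list and the tried letter
def pvChk (w : List Char) (c : Char) : Bool :=
  PySem.Set.len (PySem.Set.discard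
    (PySem.Set.ofList ((PySem.Set.ofList w).map
      (fun k => ((w.count k : Int)) - (if k == c then 1 else 0)))) 0) == 1

lemma pv_find?_filter_ne {ν : Type} (l : List (Char × ν)) (k k' : Char) (h : k' ≠ k) :
    (l.filter (fun p => !(p.1 == k))).find? (fun p => p.1 == k') = l.find? (fun p => p.1 == k') := by
  induction l with
  | nil => rfl
  | cons p t ih =>
    by_cases hk : p.1 = k
    · have h1 : (p.1 == k) = true := by simp [hk]
      have h2 : (p.1 == k') = false := by simp [hk]; exact fun e => (h e.symm).elim
      simp [h1, h2, ih]
    · have h1 : (p.1 == k) = false := by simp [hk]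
      by_cases hk' : p.1 = k'
      · simp [hk', h]
      · have h2 : (p.1 == k') = false := by simp [hk']
        simp [h1, h2, ih]

lemma pv_erase_get?_ne {ν : Type} (d : PySem.Dict Char ν) (k k' : Char) (h : k' ≠ k) :
    (d.erase k).get? k' = d.get? k' := by
  simp [PySem.Dict.erase, PySem.Dict.get?, pv_find?_filter_ne _ _ _ h]

lemma pv_erase_get?_self {ν : Type} (d : PySem.Dict Char ν) (k : Char) :
    (d.erase k).get? k = none := by
  simp only [PySem.Dict.erase, PySem.Dict.get?, Option.map_eq_none_iff, List.find?_eq_none]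
  intro p hp
  have := List.of_mem_filter hp
  simpa using this

lemma pv_erase_getD_ne {ν : Type} (d : PySem.Dict Char ν) (k k' : Char) (v : ν) (h : k' ≠ k) :
    (d.erase k).getD k' v = d.getD k' v := by
  simp [PySem.Dict.getD, pv_erase_get?_ne _ _ _ h]

lemma pv_erase_getD_self {ν : Type} (d : PySem.Dict Char ν) (k : Char) (v : ν) :
    (d.erase k).getD k v = v := by
  simp [PySem.Dict.getD, pv_erase_get?_self]

lemma pv_erase_keys {ν : Type} (d : PySem.Dict Char ν) (k : Char) :
    (d.erase k).keys = d.keys.filter (fun x => !(x == k)) := by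
  simp only [PySem.Dict.keys, PySem.Dict.erase]
  induction d.items with
  | nil => rfl
  | cons p t ih => by_cases hk : p.1 = k <;> simp [hk, ih]

-- the number of distinct values of two member-equal lists agrees
lemma pv_len_eq_of_mem_iff (s t : List Int) (hs : s.Nodup) (ht : t.Nodup)
    (h : ∀ x, x ∈ s ↔ x ∈ t) : PySem.Set.len s = PySem.Set.len t := by
  have : s.Perm t := (List.perm_ext_iff_of_nodup hs ht).mpr h
  simpa [PySem.Set.len] using this.length_eq

-- A's check on the decremented dict equals the per-letter test pvChk
lemma pv_check_eq (w : List Char) (c : Char) (hc : c ∈ w) (d2 : PySem.Dict Char Int)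
    (hnd : d2.keys.Nodup)
    (hmem : ∀ k, k ∈ d2.keys ↔ k ∈ w ∧ ¬(k = c ∧ w.count c = 1))
    (hval : ∀ k, k ∈ d2.keys → d2.getD k 0 = ((w.count k : Int)) - (if k == c then 1 else 0)) :
    (PySem.Set.len (PySem.Set.ofList d2.values) == 1) = pvChk w c := by
  have hvals : d2.values = d2.keys.map (fun k => d2.getD k 0) :=
    PySem.Dict.values_eq_map_keys d2 hnd 0
  have hmap : d2.keys.map (fun k => d2.getD k 0)
      = d2.keys.map (fun k => ((w.count k : Int)) - (if k == c then 1 else 0)) :=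
    List.map_congr_left hval
  have hcpos : 0 < w.count c := List.count_pos_iff.mpr hc
  have hlen : PySem.Set.len (PySem.Set.ofList
        (d2.keys.map (fun k => ((w.count k : Int)) - (if k == c then 1 else 0))))
      = PySem.Set.len (PySem.Set.discard
        (PySem.Set.ofList ((PySem.Set.ofList w).map
          (fun k => ((w.count k : Int)) - (if k == c then 1 else 0)))) 0) := by
    apply pv_len_eq_of_mem_iff _ _ (PySem.Set.nodup_ofList _)
      (PySem.Set.nodup_discard _ _ (PySem.Set.nodup_ofList _))
    intro x
    rw [PySem.Set.mem_ofList, PySem.Set.mem_discard, PySem.Set.mem_ofList, List.mem_map,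
      List.mem_map]
    constructor
    · rintro ⟨k, hk, rfl⟩
      obtain ⟨hkw, hne⟩ := (hmem k).mp hk
      refine ⟨⟨k, (PySem.Set.mem_ofList w k).mpr hkw, rfl⟩, ?_⟩
      by_cases hkc : k = c
      · have h1 : w.count c ≠ 1 := fun e => hne ⟨hkc, e⟩
        subst hkc
        simp only [beq_self_eq_true, if_true]
        omega
      · have hkpos : 0 < w.count k := List.count_pos_iff.mpr hkw
        simp only [beq_iff_eq, hkc, if_false]
        omega
    · rintro ⟨⟨k, hk, rfl⟩, hx⟩
      have hkw : k ∈ w := (PySem.Set.mem_ofList w k).mp hk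
      refine ⟨k, (hmem k).mpr ⟨hkw, ?_⟩, rfl⟩
      rintro ⟨rfl, hcnt⟩
      apply hx
      simp [hcnt]
  rw [pvChk, hvals, hmap, hlen]

-- the loop invariant: as long as freq represents Counter(word), the loop is `any pvChk`
lemma pv_loopA (w : List Char) : ∀ (l : List Char) (d : PySem.Dict Char Int),
    (∀ x ∈ l, x ∈ w) → d.keys.Nodup → (∀ k, k ∈ d.keys ↔ k ∈ w) →
    (∀ k, d.getD k 0 = (w.count k : Int)) →
    eqFreqLoopA l d = l.any (pvChk w) := by
  intro l
  induction l with
  | nil => intro d _ _ _ _; rfl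
  | cons c rest ih =>
    intro d hl hnd hmem hval
    have hc : c ∈ w := hl c (List.mem_cons_self)
    have hcpos : 0 < w.count c := List.count_pos_iff.mpr hc
    have hcont : d.contains c = true := (PySem.Dict.contains_iff_mem_keys d c).mpr ((hmem c).mpr hc)
    simp only [eqFreqLoopA, List.any_cons]
    set d1 := d.modify c 0 (fun v => v - 1) with hd1
    have hgd1 : ∀ k, d1.getD k 0 = if k = c then ((w.count c : Int)) - 1 else ((w.count k : Int)) := by
      intro k
      rw [hd1, PySem.Dict.getD_modify]
      split_ifs
      · rw [hval]
      · rw [hval]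
    have hkeys1 : d1.keys = d.keys := by
      rw [hd1, PySem.Dict.keys_modify, PySem.Dict.keys_insert_of_contains _ _ hcont]
    set d2 := if d1.getD c 0 == 0 then d1.erase c else d1 with hd2
    have hcond : (d1.getD c 0 == 0) = decide (w.count c = 1) := by
      rw [hgd1 c, if_pos rfl]
      by_cases hone : w.count c = 1
      · simp [hone]
      · simp [hone]; omega
    by_cases hone : w.count c = 1
    · -- the letter occurred once: it is deleted, then re-inserted at the end
      have hd2e : d2 = d1.erase c := by rw [hd2, hcond, hone]; simp
      have hk2 : d2.keys = d.keys.filter (fun x => !(x == c)) := by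
        rw [hd2e, pv_erase_keys, hkeys1]
      have hnd2 : d2.keys.Nodup := by rw [hk2]; exact hnd.filter _
      have hmem2 : ∀ k, k ∈ d2.keys ↔ k ∈ w ∧ ¬(k = c ∧ w.count c = 1) := by
        intro k
        rw [hk2, List.mem_filter]
        constructor
        · rintro ⟨hk, hne⟩
          refine ⟨(hmem k).mp hk, ?_⟩
          rintro ⟨rfl, -⟩; simp at hne
        · rintro ⟨hkw, hne⟩
          refine ⟨(hmem k).mpr hkw, ?_⟩
          simp only [Bool.not_eq_eq_eq_not, Bool.not_true, beq_eq_false_iff_ne, ne_eq]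
          rintro rfl; exact hne ⟨rfl, hone⟩
      have hval2 : ∀ k, k ∈ d2.keys → d2.getD k 0 = ((w.count k : Int)) - (if k == c then 1 else 0) := by
        intro k hk
        have hkne : k ≠ c := by
          rcases (hmem2 k).mp hk with ⟨-, hne⟩
          rintro rfl; exact hne ⟨rfl, hone⟩
        rw [hd2e, pv_erase_getD_ne _ _ _ _ hkne, hgd1 k, if_neg hkne]
        simp [hkne]
      rw [pv_check_eq w c hc d2 hnd2 hmem2 hval2]
      cases hchk : pvChk w c
      · simp only [Bool.false_eq_true, if_false, Bool.false_or]
        apply ih _ (fun x hx => hl x (List.mem_cons_of_mem _ hx))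
        · -- keys of d2.modify c 0 (+1) : d2.keys ++ [c], still nodup
          have hnc : d2.contains c = false := by
            simp only [PySem.Dict.contains_eq_decide_mem_keys, hk2, decide_eq_false_iff_not,
              List.mem_filter]
            rintro ⟨-, hne⟩; simp at hne
          rw [PySem.Dict.keys_modify, PySem.Dict.keys_insert_of_not_contains _ _ hnc]
          rw [List.nodup_append]
          refine ⟨hnd2, List.nodup_singleton c, ?_⟩
          intro x hx b hb hxb
          rw [List.mem_singleton] at hb
          exact ((hmem2 x).mp hx).2 ⟨hb ▸ hxb, hone⟩
        · intro k
          rw [PySem.Dict.keys_modify, PySem.Dict.mem_keys_insert]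
          constructor
          · rintro (rfl | hk)
            · exact hc
            · exact ((hmem2 k).mp hk).1
          · intro hkw
            by_cases hkc : k = c
            · exact Or.inl hkc
            · exact Or.inr ((hmem2 k).mpr ⟨hkw, by rintro ⟨rfl, -⟩; exact hkc rfl⟩)
        · intro k
          rw [PySem.Dict.getD_modify]
          split_ifs with hkc
          · subst hkc
            rw [hd2e, pv_erase_getD_self]
            omega
          · rw [hd2e, pv_erase_getD_ne _ _ _ _ hkc, hgd1 k, if_neg hkc]
      · simp
    · -- the letter occurred more than once: no deletion happened
      have hd2e : d2 = d1 := by rw [hd2, hcond]; simp [hone]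
      have hk2 : d2.keys = d.keys := by rw [hd2e, hkeys1]
      have hnd2 : d2.keys.Nodup := by rw [hk2]; exact hnd
      have hmem2 : ∀ k, k ∈ d2.keys ↔ k ∈ w ∧ ¬(k = c ∧ w.count c = 1) := by
        intro k
        rw [hk2]
        constructor
        · intro hk; exact ⟨(hmem k).mp hk, by rintro ⟨-, h1⟩; exact hone h1⟩
        · rintro ⟨hkw, -⟩; exact (hmem k).mpr hkw
      have hval2 : ∀ k, k ∈ d2.keys → d2.getD k 0 = ((w.count k : Int)) - (if k == c then 1 else 0) := by
        intro k _
        rw [hd2e, hgd1 k]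
        by_cases hkc : k = c
        · subst hkc; simp
        · simp [hkc]
      rw [pv_check_eq w c hc d2 hnd2 hmem2 hval2]
      cases hchk : pvChk w c
      · simp only [Bool.false_eq_true, if_false, Bool.false_or]
        apply ih _ (fun x hx => hl x (List.mem_cons_of_mem _ hx))
        · rw [PySem.Dict.keys_modify, PySem.Dict.keys_insert_of_contains]
          · exact hnd2
          · rw [PySem.Dict.contains_iff_mem_keys, hk2]; exact (hmem c).mpr hc
        · intro k
          rw [PySem.Dict.keys_modify, PySem.Dict.mem_keys_insert, hk2]
          constructor
          · rintro (rfl | hk)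
            · exact hc
            · exact (hmem k).mp hk
          · intro hkw; exact Or.inr ((hmem k).mpr hkw)
        · intro k
          rw [PySem.Dict.getD_modify]
          split_ifs with hkc
          · subst hkc; rw [hd2e, hgd1 k, if_pos rfl]; ring
          · rw [hd2e, hgd1 k, if_neg hkc]
      · simp

lemma pv_A_eq_any (w : List Char) :
    eqFreqLoopA w (PySem.Dict.counter w) = w.any (pvChk w) := by
  refine pv_loopA w w _ (fun x hx => hx) (PySem.Dict.nodup_keys_counter w) ?_ ?_
  · intro k; rw [PySem.Dict.keys_counter]; exact PySem.Set.mem_ofList w k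
  · intro k; exact PySem.Dict.getD_counter w k

-- ===== B-side lemmas =====

-- the multiset of letter counts (one entry per distinct letter)
def pvCs (w : List Char) : List Int := (PySem.Set.ofList w).map (fun k => ((w.count k : Int)))

lemma pv_values_counter (w : List Char) : (PySem.Dict.counter w).values = pvCs w := by
  simp only [PySem.Dict.values, PySem.Dict.items_counter, List.map_map]
  rfl

lemma pv_mem_cs (w : List Char) (x : Int) :
    x ∈ pvCs w ↔ ∃ k, k ∈ w ∧ ((w.count k : Int)) = x := by
  simp [pvCs, List.mem_map, PySem.Set.mem_ofList]

lemma pv_count_map (f : Char → Int) (l : List Char) (v : Int) :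
    (l.map f).count v = l.countP (fun a => f a == v) := by
  induction l with
  | nil => rfl
  | cons a t ih => simp [List.count_cons, List.countP_cons, ih]

lemma pv_countP_ge_two (l : List Char) (hnd : l.Nodup) (p : Char → Bool) (c : Char)
    (hc : c ∈ l) (hpc : p c = true) :
    2 ≤ l.countP p ↔ ∃ k, k ∈ l ∧ k ≠ c ∧ p k = true := by
  rw [List.countP_eq_length_filter]
  have hcf : c ∈ l.filter p := List.mem_filter.mpr ⟨hc, hpc⟩
  have hndf : (l.filter p).Nodup := hnd.filter p
  constructor
  · intro h2
    by_contra hno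
    push Not at hno
    have hall : ∀ k ∈ l.filter p, k = c := by
      intro k hk
      rcases List.mem_filter.mp hk with ⟨hkl, hkp⟩
      by_contra hne
      exact absurd hkp (by simpa using hno k hkl hne)
    rcases hlf : l.filter p with - | ⟨x, - | ⟨y, t⟩⟩
    · simp [hlf] at h2
    · simp [hlf] at h2
    · have hx := hall x (by rw [hlf]; exact List.mem_cons_self)
      have hy := hall y (by rw [hlf]; exact List.mem_cons_of_mem _ List.mem_cons_self)
      rw [hlf] at hndf
      have := (List.pairwise_cons.mp hndf).1 y List.mem_cons_self
      exact this (hx.trans hy.symm)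
  · rintro ⟨k, hkl, hkc, hkp⟩
    have hkf : k ∈ l.filter p := List.mem_filter.mpr ⟨hkl, hkp⟩
    obtain ⟨s, t, hst⟩ := List.append_of_mem hkf
    have hcst : c ∈ s ++ t := by
      have hc2 := hcf
      rw [hst] at hc2
      rcases List.mem_append.mp hc2 with h | h
      · exact List.mem_append.mpr (Or.inl h)
      · rcases List.mem_cons.mp h with rfl | h
        · exact absurd rfl hkc.symm
        · exact List.mem_append.mpr (Or.inr h)
    have h1 : 1 ≤ (s ++ t).length := List.length_pos_of_mem hcst
    rw [hst]
    simp only [List.length_append, List.length_cons] at h1 ⊢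
    omega

lemma pv_cs_two (w : List Char) (c : Char) (hc : c ∈ w) :
    2 ≤ (pvCs w).count ((w.count c : Int)) ↔ ∃ k, k ∈ w ∧ k ≠ c ∧ w.count k = w.count c := by
  rw [pvCs, pv_count_map]
  rw [pv_countP_ge_two (PySem.Set.ofList w) (PySem.Set.nodup_ofList w) _ c
    ((PySem.Set.mem_ofList w c).mpr hc) (by simp)]
  constructor
  · rintro ⟨k, hk, hkc, hkp⟩
    exact ⟨k, (PySem.Set.mem_ofList w k).mp hk, hkc, by exact_mod_cast (beq_iff_eq.mp hkp)⟩
  · rintro ⟨k, hk, hkc, hkp⟩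
    exact ⟨k, (PySem.Set.mem_ofList w k).mpr hk, hkc, by simp [hkp]⟩

-- membership in the set A's check inspects for the letter c
lemma pv_chk_mem (w : List Char) (c : Char) (x : Int) :
    (x ∈ PySem.Set.discard (PySem.Set.ofList ((PySem.Set.ofList w).map
      (fun k => ((w.count k : Int)) - (if k == c then 1 else 0)))) 0)
    ↔ x ≠ 0 ∧ ∃ k, k ∈ w ∧ ((w.count k : Int)) - (if k = c then 1 else 0) = x := by
  rw [PySem.Set.mem_discard, PySem.Set.mem_ofList, List.mem_map]
  constructor
  · rintro ⟨⟨k, hk, hfk⟩, hx0⟩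
    refine ⟨hx0, k, (PySem.Set.mem_ofList w k).mp hk, ?_⟩
    simpa [beq_iff_eq] using hfk
  · rintro ⟨hx0, k, hk, hfk⟩
    refine ⟨⟨k, (PySem.Set.mem_ofList w k).mpr hk, ?_⟩, hx0⟩
    simpa [beq_iff_eq] using hfk

-- the per-letter test depends on the letter only through its count
lemma pv_chk_congr_aux (w : List Char) (c c' : Char) (hc : c ∈ w) (hc' : c' ∈ w)
    (h : w.count c = w.count c') (x : Int)
    (hx : ∃ k, k ∈ w ∧ ((w.count k : Int)) - (if k = c then 1 else 0) = x) :
    ∃ k, k ∈ w ∧ ((w.count k : Int)) - (if k = c' then 1 else 0) = x := by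
  obtain ⟨k, hk, hfk⟩ := hx
  by_cases hkc : k = c
  · subst hkc
    refine ⟨c', hc', ?_⟩
    rw [if_pos rfl, ← h]
    simpa using hfk
  · by_cases hkc' : k = c'
    · subst hkc'
      rw [if_neg hkc] at hfk
      refine ⟨c, hc, ?_⟩
      have hne : ¬(c = k) := fun e => hkc e.symm
      rw [if_neg hne, h]
      simpa using hfk
    · rw [if_neg hkc] at hfk
      exact ⟨k, hk, by rw [if_neg hkc']; simpa using hfk⟩

lemma pv_chk_congr (w : List Char) (c c' : Char) (hc : c ∈ w) (hc' : c' ∈ w)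
    (h : w.count c = w.count c') : pvChk w c = pvChk w c' := by
  unfold pvChk
  rw [pv_len_eq_of_mem_iff _ _
    (PySem.Set.nodup_discard _ _ (PySem.Set.nodup_ofList _))
    (PySem.Set.nodup_discard _ _ (PySem.Set.nodup_ofList _)) ?_]
  intro x
  rw [pv_chk_mem, pv_chk_mem]
  constructor
  · rintro ⟨hx0, hx⟩; exact ⟨hx0, pv_chk_congr_aux w c c' hc hc' h x hx⟩
  · rintro ⟨hx0, hx⟩; exact ⟨hx0, pv_chk_congr_aux w c' c hc' hc h.symm x hx⟩

lemma pv_len_one (s : List Int) (h : (PySem.Set.len s == 1) = true) :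
    ∃ m, m ∈ s ∧ ∀ x ∈ s, x = m := by
  have h' : PySem.Set.len s = 1 := beq_iff_eq.mp h
  have hlen : s.length = 1 := by
    simp only [PySem.Set.len] at h'
    exact_mod_cast h'
  obtain ⟨a, rfl⟩ := List.length_eq_one_iff.mp hlen
  exact ⟨a, List.mem_singleton.mpr rfl, by simp⟩

-- pairwise-≤ list: every element is at most the last one
lemma pv_le_getLast (l : List Int) (h : l ≠ []) (hp : l.Pairwise (· ≤ ·)) :
    ∀ x ∈ l, x ≤ l.getLast h := by
  induction l with
  | nil => simp at h
  | cons a t ih =>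
    intro x hx
    cases t with
    | nil =>
      rcases List.mem_cons.mp hx with rfl | hx'
      · simp [List.getLast]
      · simp at hx'
    | cons b t' =>
      rw [List.getLast_cons (by simp)]
      rcases List.mem_cons.mp hx with rfl | hx'
      · exact (List.pairwise_cons.mp hp).1 _ (List.getLast_mem _)
      · exact ih (by simp) (List.pairwise_cons.mp hp).2 x hx'

-- only a letter of minimal or of maximal count can make the per-letter test succeed
lemma pv_min_max (w : List Char) (cmin cmax : Char) (hminw : cmin ∈ w) (hmaxw : cmax ∈ w)
    (hmin : ∀ k ∈ w, w.count cmin ≤ w.count k) (hmax : ∀ k ∈ w, w.count k ≤ w.count cmax) :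
    w.any (pvChk w) = (pvChk w cmin || pvChk w cmax) := by
  rw [Bool.eq_iff_iff]
  simp only [List.any_eq_true, Bool.or_eq_true]
  constructor
  · rintro ⟨c, hcw, hchk⟩
    by_cases h1 : w.count c ≤ 1
    · left
      have hc1 : w.count c = 1 := le_antisymm h1 (List.count_pos_iff.mpr hcw)
      have he : w.count cmin = w.count c := by
        have := hmin c hcw
        have := List.count_pos_iff.mpr hminw
        omega
      rwa [pv_chk_congr w cmin c hminw hcw he]
    · right
      push Not at h1
      have hcex : w.count cmax = w.count c := by
        by_cases hceq : cmax = c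
        · rw [hceq]
        · exfalso
          unfold pvChk at hchk
          obtain ⟨m, hmmem, hall⟩ := pv_len_one _ hchk
          have hv1 : ((w.count c : Int)) - 1 ∈ _ := (pv_chk_mem w c _).mpr
            ⟨by omega, c, hcw, by simp⟩
          have hvmax : ((w.count cmax : Int)) ∈ _ := (pv_chk_mem w c _).mpr
            ⟨by have := List.count_pos_iff.mpr hmaxw; omega,
             cmax, hmaxw, by simp [hceq]⟩
          have e1 := hall _ hv1
          have e2 := hall _ hvmax
          have h3 := hmax c hcw
          omega
      rwa [pv_chk_congr w cmax c hmaxw hcw hcex]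
  · rintro (h | h)
    · exact ⟨cmin, hminw, h⟩
    · exact ⟨cmax, hmaxw, h⟩

-- the tail left after removing one entry with c's count from the count multiset
lemma pv_removed_iff (w : List Char) (c : Char) (hc : c ∈ w) (l : List Int)
    (hp : (((w.count c : Int)) :: l).Perm (pvCs w)) (x : Int) :
    x ∈ l ↔ ∃ k, k ∈ w ∧ k ≠ c ∧ ((w.count k : Int)) = x := by
  have hcnt := hp.count_eq x
  by_cases hx : x = ((w.count c : Int))
  · subst hx
    rw [List.count_cons_self] at hcnt
    constructor
    · intro hxl
      have h1 : 0 < l.count ((w.count c : Int)) := List.count_pos_iff.mpr hxl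
      have h2 : 2 ≤ (pvCs w).count ((w.count c : Int)) := by omega
      obtain ⟨k, hk, hkc, hkcnt⟩ := (pv_cs_two w c hc).mp h2
      exact ⟨k, hk, hkc, by exact_mod_cast hkcnt⟩
    · rintro ⟨k, hk, hkc, hkx⟩
      have h2 : 2 ≤ (pvCs w).count ((w.count c : Int)) :=
        (pv_cs_two w c hc).mpr ⟨k, hk, hkc, by exact_mod_cast hkx⟩
      have h1 : 0 < l.count ((w.count c : Int)) := by omega
      exact List.count_pos_iff.mp h1
  · have hcnt' : l.count x = (pvCs w).count x := by
      rw [List.count_cons] at hcnt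
      simpa [Ne.symm hx, beq_iff_eq] using hcnt
    constructor
    · intro hxl
      have : x ∈ pvCs w :=
        List.count_pos_iff.mp (hcnt' ▸ List.count_pos_iff.mpr hxl)
      obtain ⟨k, hk, hkx⟩ := (pv_mem_cs w x).mp this
      refine ⟨k, hk, ?_, hkx⟩
      rintro rfl; exact hx hkx.symm
    · rintro ⟨k, hk, hkc, hkx⟩
      have : x ∈ pvCs w := (pv_mem_cs w x).mpr ⟨k, hk, hkx⟩
      have := List.count_pos_iff.mpr this
      rw [← hcnt'] at this
      exact List.count_pos_iff.mp this

-- A's per-letter test for c equals B's _balanced on any list with the right members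
lemma pv_chk_eq (w : List Char) (c : Char) (hc : c ∈ w) (m : List Int)
    (hm : ∀ x, x ∈ m ↔ (x = ((w.count c : Int)) - 1 ∨ ∃ k, k ∈ w ∧ k ≠ c ∧ ((w.count k : Int)) = x)) :
    pvChk w c = pvBalanced m := by
  unfold pvChk pvBalanced
  rw [pv_len_eq_of_mem_iff _ _
    (PySem.Set.nodup_discard _ _ (PySem.Set.nodup_ofList _))
    (PySem.Set.nodup_ofList _) ?_]
  intro x
  rw [pv_chk_mem, PySem.Set.mem_ofList, List.mem_filter, hm]
  constructor
  · rintro ⟨hx0, k, hk, hfk⟩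
    refine ⟨?_, by simpa using hx0⟩
    by_cases hkc : k = c
    · subst hkc; left; rw [← hfk]; simp
    · right; exact ⟨k, hk, hkc, by simpa [hkc] using hfk⟩
  · rintro ⟨hx, hx0⟩
    have hx0' : x ≠ 0 := by simpa using hx0
    refine ⟨hx0', ?_⟩
    rcases hx with rfl | ⟨k, hk, hkc, hkx⟩
    · exact ⟨c, hc, by simp⟩
    · exact ⟨k, hk, by simpa [hkc] using hkx⟩

-- ===== VERDICT (by name: the statement is the Claim_ definition above) =====
theorem equalFrequency_spec : Claim_equal_equalFrequency := by
  intro word _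
  show equalFrequency word = equalFrequency_alt word
  rw [equalFrequency, pv_A_eq_any]
  rw [equalFrequency_alt, pv_values_counter]
  cases h : PySem.List.sorted (pvCs word.toList) (fun v => v) false with
  | nil =>
    have hcs : pvCs word.toList = [] := by rwa [PySem.List.sorted_eq_nil_iff] at h
    have hw : word.toList = [] := by
      cases hwl : word.toList with
      | nil => rfl
      | cons a t =>
        exfalso
        have : ((word.toList.count a : Int)) ∈ pvCs word.toList :=
          (pv_mem_cs _ _).mpr ⟨a, by rw [hwl]; exact List.mem_cons_self, rfl⟩
        rw [hcs] at this
        simp at this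
    rw [hw]
    rfl
  | cons c0 rest =>
    have hperm : (c0 :: rest).Perm (pvCs word.toList) := by
      have := PySem.List.sorted_perm (pvCs word.toList) (fun v => v) false
      rwa [h] at this
    have hc0 : c0 ∈ pvCs word.toList := hperm.mem_iff.mp List.mem_cons_self
    obtain ⟨cmin, hminw, hminc⟩ := (pv_mem_cs _ c0).mp hc0
    have hM : (c0 :: rest).getLast (List.cons_ne_nil c0 rest) ∈ pvCs word.toList :=
      hperm.mem_iff.mp (List.getLast_mem _)
    obtain ⟨cmax, hmaxw, hmaxc⟩ := (pv_mem_cs _ _).mp hM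
    have hpair : (c0 :: rest).Pairwise (fun a b => a ≤ b) := by
      have := PySem.List.sorted_pairwise (pvCs word.toList) (fun v => v)
      rwa [h] at this
    have hminp : ∀ k ∈ word.toList, word.toList.count cmin ≤ word.toList.count k := by
      intro k hk
      have hk' : ((word.toList.count k : Int)) ∈ pvCs word.toList := (pv_mem_cs _ _).mpr ⟨k, hk, rfl⟩
      have := PySem.List.key_head_sorted_le (pvCs word.toList) (fun v => v) h _ hk'
      simp only at this
      rw [← hminc] at this
      exact_mod_cast this
    have hmaxp : ∀ k ∈ word.toList, word.toList.count k ≤ word.toList.count cmax := by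
      intro k hk
      have hk' : ((word.toList.count k : Int)) ∈ pvCs word.toList := (pv_mem_cs _ _).mpr ⟨k, hk, rfl⟩
      have hks : ((word.toList.count k : Int)) ∈ c0 :: rest := hperm.mem_iff.mpr hk'
      have := pv_le_getLast (c0 :: rest) (List.cons_ne_nil c0 rest) hpair _ hks
      rw [← hmaxc] at this
      exact_mod_cast this
    rw [pv_min_max word.toList cmin cmax hminw hmaxw hminp hmaxp]
    congr 1
    · apply pv_chk_eq _ cmin hminw
      intro x
      rw [List.mem_cons, pv_removed_iff word.toList cmin hminw rest (by rw [hminc]; exact hperm) x,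
        hminc]
    · apply pv_chk_eq _ cmax hmaxw
      intro x
      have hperm2 : (((word.toList.count cmax : Int)) :: (c0 :: rest).dropLast).Perm (pvCs word.toList) := by
        rw [hmaxc]
        have hsplit : (c0 :: rest).dropLast ++ [(c0 :: rest).getLast (List.cons_ne_nil c0 rest)]
            = c0 :: rest := List.dropLast_append_getLast _
        have h1 : ((c0 :: rest).dropLast ++ [(c0 :: rest).getLast (List.cons_ne_nil c0 rest)]).Perm
            (pvCs word.toList) := by rw [hsplit]; exact hperm
        exact (List.perm_append_singleton _ _).symm.trans h1
      rw [List.mem_append, List.mem_singleton,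
        pv_removed_iff word.toList cmax hmaxw _ hperm2 x, hmaxc]
      constructor
      · rintro (hx | hx)
        · right; exact hx
        · left; exact hx
      · rintro (hx | hx)
        · right; exact hx
        · left; exact hx
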